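-- pv_equiv track=rewrite | github.com/Prolead1/onlyPositiveAlpha | scripts/build_resolution_from_mapping_vectors.py | combine_date_market_filters
-- ===== SOURCE A (Python) =====
-- def combine_date_market_filters(
--     filters: list[set[tuple[str, str]]],
-- ) -> set[tuple[str, str]] | None:
--     """Combine optional (date, market_id) pair filters by intersection."""
--     non_empty_filters = [pairs for pairs in filters if pairs]
--     if not non_empty_filters:
--         return None
--
--     combined = set(non_empty_filters[0])
--     for pairs in non_empty_filters[1:]:
--         combined &= pairs
--     return combined
-- ===== SOURCE B (Python) =====
-- def combine_date_market_filters(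
--     filters: list[set[tuple[str, str]]],
-- ) -> set[tuple[str, str]] | None:
--     """Combine optional (date, market_id) pair filters by intersection,
--     computed in one counting pass: a pair is in the intersection iff it
--     occurs in every non-empty filter."""
--     non_empty_filters = [pairs for pairs in filters if pairs]
--     if not non_empty_filters:
--         return None
--     counts = {}
--     for pairs in non_empty_filters:
--         for pair in pairs:
--             counts[pair] = counts.get(pair, 0) + 1
--     n = len(non_empty_filters)
--     return {pair for pair, c in counts.items() if c == n}
-- ===== Notes on version B (the rewrite author's own statement) =====
-- stated objective: alternative
-- what changed: Replaces A's repeated pairwise set intersections with a single counting pass over all pairs plus a threshold filter (pair kept iff its count equals the number of non-empty filters), keeping the None guard.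
import Mathlib
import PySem

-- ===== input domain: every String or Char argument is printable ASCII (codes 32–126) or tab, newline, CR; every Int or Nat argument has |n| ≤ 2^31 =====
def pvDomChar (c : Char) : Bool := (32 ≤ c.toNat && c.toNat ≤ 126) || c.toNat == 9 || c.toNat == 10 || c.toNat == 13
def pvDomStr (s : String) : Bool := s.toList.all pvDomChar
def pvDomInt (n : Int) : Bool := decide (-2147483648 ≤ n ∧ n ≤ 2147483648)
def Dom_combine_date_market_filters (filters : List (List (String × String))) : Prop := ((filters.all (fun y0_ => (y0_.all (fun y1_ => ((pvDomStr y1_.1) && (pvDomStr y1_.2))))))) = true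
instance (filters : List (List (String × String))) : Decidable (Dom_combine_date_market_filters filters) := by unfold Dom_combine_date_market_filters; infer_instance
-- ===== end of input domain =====

-- B replaces A's repeated pairwise set intersections by a single counting pass
-- (a pair is kept iff it occurs in every non-empty filter) — alternative decomposition, same cost class.

-- ===== PORT A =====
def combine_date_market_filters (filters : List (List (String × String))) : Option (List (String × String)) :=
  let non_empty_filters := filters.filter (fun pairs => !pairs.isEmpty)
  match non_empty_filters with
  | [] => none
  | first :: restf =>
    some (restf.foldl (fun combined pairs => PySem.Set.inter combined pairs) (PySem.Set.ofList first))

-- ===== PORT B =====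
def combine_date_market_filters_alt (filters : List (List (String × String))) : Option (List (String × String)) :=
  let non_empty_filters := filters.filter (fun pairs => !pairs.isEmpty)
  if non_empty_filters.isEmpty then none
  else
    let counts : PySem.Dict (String × String) Int :=
      non_empty_filters.foldl
        (fun d pairs => (PySem.Set.ofList pairs).foldl
          (fun d pair => d.insert pair (d.getD pair 0 + 1)) d)
        PySem.Dict.empty
    let n : Int := non_empty_filters.length
    some ((counts.items.filter (fun pc => pc.2 == n)).map (fun pc => pc.1))

-- ===== PRECONDITION & SPEC =====
def Spec_combine_date_market_filters (filters : List (List (String × String))) (out : Option (List (String × String))) : Prop := out = combine_date_market_filters_alt filters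
instance (filters : List (List (String × String))) (out : Option (List (String × String))) : Decidable (Spec_combine_date_market_filters filters out) := by unfold Spec_combine_date_market_filters; infer_instance

-- ===== CLAIM (what is proved, stated in full; the proofs are below) =====
def Claim_equal_combine_date_market_filters : Prop := ∀ (filters : List (List (String × String))), Dom_combine_date_market_filters filters → Spec_combine_date_market_filters filters (combine_date_market_filters filters)

-- ===== LEMMAS AND PROOFS =====

-- A's intersection loop filters the first set by membership in every later set.
lemma pv_foldl_inter (rest : List (List (String × String))) (s : PySem.Set (String × String)) :
    rest.foldl (fun combined pairs => PySem.Set.inter combined pairs) s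
      = s.filter (fun x => rest.all (fun t => t.contains x)) := by
  induction rest generalizing s with
  | nil => simp
  | cons a r ih =>
    rw [List.foldl_cons, ih (PySem.Set.inter s a)]
    simp only [PySem.Set.inter, List.filter_filter, List.all_cons]
    exact List.filter_congr (fun x _ => by
      rw [Bool.and_comm, PySem.Set.contains_eq_listContains])

-- the multiplicity of a pair in the deduplicated flattening counts the filters containing it
lemma pv_count_flat (l : List (List (String × String))) (k : String × String) :
    List.count k (l.flatMap PySem.Set.ofList) = l.countP (fun s => s.contains k) := by
  induction l with
  | nil => simp
  | cons a r ih =>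
    rw [List.flatMap_cons, List.count_append, ih]
    simp only [List.countP_cons]
    by_cases h : k ∈ a
    · rw [List.count_eq_one_of_mem (PySem.Set.nodup_ofList a) ((PySem.Set.mem_ofList a k).mpr h),
        if_pos (List.contains_iff_mem.mpr h)]
      omega
    · rw [List.count_eq_zero.mpr (fun hm => h ((PySem.Set.mem_ofList a k).mp hm)),
        if_neg (fun hc => h (List.contains_iff_mem.mp hc))]
      omega

-- items of a counter, filtered on the value and projected to keys, is a filter on the keys
lemma pv_filter_items (l : List (String × String)) (c : (String × String) → Int) (n : Int) :
    ((l.map (fun k => (k, c k))).filter (fun pc => pc.2 == n)).map (fun pc => pc.1)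
      = l.filter (fun k => c k == n) := by
  rw [List.filter_map, List.map_map]
  simp [Function.comp_def]

-- B's counting pass computes A's intersection, elementwise and in the same order
lemma pv_main (first : List (String × String)) (restf : List (List (String × String))) :
    ((PySem.Dict.counter ((first :: restf).flatMap PySem.Set.ofList)).items.filter
        (fun pc => pc.2 == ((first :: restf).length : Int))).map (fun pc => pc.1)
      = restf.foldl (fun combined pairs => PySem.Set.inter combined pairs) (PySem.Set.ofList first) := by
  rw [pv_foldl_inter, PySem.Dict.items_counter, pv_filter_items]
  -- split set(flattening) into set(first) ++ the genuinely new elements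
  have hsplit : PySem.Set.ofList ((first :: restf).flatMap PySem.Set.ofList)
      = PySem.Set.ofList first ++
        (PySem.Set.ofList (restf.flatMap PySem.Set.ofList)).filter
          (fun y => !(PySem.Set.contains (PySem.Set.ofList first) y)) := by
    rw [List.flatMap_cons, PySem.Set.ofList_append, PySem.Set.update_eq_append_filter,
      PySem.Set.ofList_ofList]
  rw [hsplit, List.filter_append]
  -- the new elements are absent from `first`, so their count stays below the threshold
  have h2 : ((PySem.Set.ofList (restf.flatMap PySem.Set.ofList)).filter
        (fun y => !(PySem.Set.contains (PySem.Set.ofList first) y))).filter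
        (fun k => ((List.count k ((first :: restf).flatMap PySem.Set.ofList) : Int)
          == ((first :: restf).length : Int))) = [] := by
    rw [List.filter_eq_nil_iff]
    intro y hy
    have hnot : y ∉ first := by
      have hb := (List.mem_filter.mp hy).2
      intro hmem
      rw [(PySem.Set.contains_iff (PySem.Set.ofList first) y).mpr
        ((PySem.Set.mem_ofList first y).mpr hmem)] at hb
      simp at hb
    have hle : restf.countP (fun s => s.contains y) ≤ restf.length := List.countP_le_length
    rw [pv_count_flat]
    simp only [List.countP_cons]
    rw [if_neg (fun hc => hnot (List.contains_iff_mem.mp hc))]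
    simp only [beq_iff_eq, List.length_cons]
    omega
  rw [h2, List.append_nil]
  -- on elements of `first`, count = length ↔ every later filter contains it
  apply List.filter_congr
  intro x hx
  have hxf : x ∈ first := (PySem.Set.mem_ofList first x).mp hx
  have hc1 : (first.contains x) = true := List.contains_iff_mem.mpr hxf
  have hle : restf.countP (fun s => s.contains x) ≤ restf.length := List.countP_le_length
  rw [pv_count_flat]
  simp only [List.countP_cons]
  rw [if_pos hc1]
  cases hall : restf.all (fun t => t.contains x) with
  | true =>
    have hcp : restf.countP (fun s => s.contains x) = restf.length :=
      List.countP_eq_length.mpr (fun a ha => List.all_eq_true.mp hall a ha)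
    simp only [beq_iff_eq, List.length_cons, Nat.cast_inj]
    omega
  | false =>
    have hne : restf.countP (fun s => s.contains x) ≠ restf.length := by
      intro he
      rw [List.all_eq_true.mpr (List.countP_eq_length.mp he)] at hall
      cases hall
    simp only [beq_eq_false_iff_ne, ne_eq, List.length_cons, Nat.cast_inj]
    omega

-- ===== VERDICT (by name: the statement is the Claim_ definition above) =====
theorem combine_date_market_filters_spec : Claim_equal_combine_date_market_filters := by
  intro filters _
  unfold Spec_combine_date_market_filters combine_date_market_filters combine_date_market_filters_alt
  cases hnef : filters.filter (fun pairs => !pairs.isEmpty) with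
  | nil => simp
  | cons first restf =>
    simp only [List.isEmpty_cons, Bool.false_eq_true, if_false]
    rw [← List.foldl_flatMap, PySem.Dict.foldl_insert_getD_add_one_eq_counter, pv_main]
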